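-- pv_equiv track=rewrite | github.com/matz-d/daytrace-plugin | scripts/skill_miner_prepare.py | _combine_origin_hints
-- ===== SOURCE A (Python) =====
-- def _combine_origin_hints(origin_hints: list[str]) -> str:
--     normalized = [str(value).strip() for value in origin_hints if str(value).strip()]
--     distinct = set(normalized)
--     if not distinct:
--         return ""
--     if len(distinct) == 1:
--         return next(iter(distinct))
--     if "human" in distinct:
--         return "mixed"
--     if "parent_ai" in distinct:
--         return "parent_ai"
--     return "unknown"
-- ===== SOURCE B (Python) =====
-- def _combine_origin_hints(origin_hints: list[str]) -> str:
--     first = None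
--     multiple = False
--     has_human = False
--     has_parent_ai = False
--     for value in origin_hints:
--         s = str(value).strip()
--         if not s:
--             continue
--         if first is None:
--             first = s
--         elif s != first:
--             multiple = True
--         if s == "human":
--             has_human = True
--         if s == "parent_ai":
--             has_parent_ai = True
--     if first is None:
--         return ""
--     if not multiple:
--         return first
--     if has_human:
--         return "mixed"
--     if has_parent_ai:
--         return "parent_ai"
--     return "unknown"
-- ===== Notes on version B (the rewrite author's own statement) =====
-- stated objective: alternative
-- what changed: Replaced the build-a-set-then-test-membership approach by a single pass with scalar state (first value seen, a 'multiple distinct values' flag, and has_human/has_parent_ai flags), so no set is materialized.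
import Mathlib
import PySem

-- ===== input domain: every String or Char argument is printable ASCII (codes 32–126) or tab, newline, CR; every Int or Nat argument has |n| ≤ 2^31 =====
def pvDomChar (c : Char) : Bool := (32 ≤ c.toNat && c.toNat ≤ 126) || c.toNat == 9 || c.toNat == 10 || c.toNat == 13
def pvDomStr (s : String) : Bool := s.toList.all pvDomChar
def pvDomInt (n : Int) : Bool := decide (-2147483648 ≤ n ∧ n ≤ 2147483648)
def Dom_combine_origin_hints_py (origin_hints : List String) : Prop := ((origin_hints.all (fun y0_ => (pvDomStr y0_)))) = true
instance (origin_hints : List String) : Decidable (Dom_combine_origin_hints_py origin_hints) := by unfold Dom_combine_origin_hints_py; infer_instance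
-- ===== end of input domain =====

-- B replaces A's build-a-set-then-test-membership by a single pass with scalar state; same cost, no set materialized.

-- ===== PORT A =====
def combine_origin_hints_py (origin_hints : List String) : String :=
  let normalized := (origin_hints.map (fun value => PySem.Str.strip value)).filter (fun s => s != "")
  let distinct : PySem.Set String := PySem.Set.ofList normalized
  if distinct.isEmpty then ""
  else if PySem.Set.len distinct = 1 then
    -- next(iter(distinct)): guarded by len = 1, so the single element; hash order cannot matter
    distinct.headD ""
  else if PySem.Set.contains distinct "human" then "mixed"
  else if PySem.Set.contains distinct "parent_ai" then "parent_ai"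
  else "unknown"

-- ===== PORT B =====
-- loop body of Source B: state = (first, multiple, has_human, has_parent_ai)
def combineOriginHintsStep (st : Option String × Bool × Bool × Bool) (s : String) :
    Option String × Bool × Bool × Bool :=
  if s == "" then st
  else
    let st1 : Option String × Bool × Bool × Bool :=
      match st with
      | (none, m, h, p) => (some s, m, h, p)
      | (some f, m, h, p) => (some f, m || (s != f), h, p)
    match st1 with
    | (f, m, h, p) => (f, m, h || (s == "human"), p || (s == "parent_ai"))

def combine_origin_hints_py_alt (origin_hints : List String) : String :=
  let st := origin_hints.foldl
    (fun st value => combineOriginHintsStep st (PySem.Str.strip value))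
    (none, false, false, false)
  match st with
  | (none, _, _, _) => ""
  | (some f, m, h, p) =>
    if !m then f
    else if h then "mixed"
    else if p then "parent_ai"
    else "unknown"

-- ===== PRECONDITION & SPEC =====
def Spec_combine_origin_hints_py (origin_hints : List String) (out : String) : Prop := out = combine_origin_hints_py_alt origin_hints
instance (origin_hints : List String) (out : String) : Decidable (Spec_combine_origin_hints_py origin_hints out) := by unfold Spec_combine_origin_hints_py; infer_instance

-- ===== CLAIM (what is proved, stated in full; the proofs are below) =====
def Claim_equal_combine_origin_hints_py : Prop := ∀ (origin_hints : List String), Dom_combine_origin_hints_py origin_hints → Spec_combine_origin_hints_py origin_hints (combine_origin_hints_py origin_hints)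

-- ===== LEMMAS AND PROOFS =====

-- the step skips empty strings, so folding over a list equals folding over its nonempty filter
theorem foldl_step_filter (l : List String) (st : Option String × Bool × Bool × Bool) :
    l.foldl combineOriginHintsStep st = (l.filter (fun s => s != "")).foldl combineOriginHintsStep st := by
  induction l generalizing st with
  | nil => rfl
  | cons a t ih =>
    by_cases ha : a = ""
    · subst ha
      simp [List.foldl_cons, combineOriginHintsStep, ih]
    · simp [List.foldl_cons, ha, ih]

-- invariant once a first value is fixed, over lists of nonempty strings
theorem foldl_step_some (l : List String) (hne : ∀ s ∈ l, s ≠ "")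
    (f : String) (m h p : Bool) :
    l.foldl combineOriginHintsStep (some f, m, h, p)
      = (some f, m || l.any (fun s => s != f), h || l.any (fun s => s == "human"),
         p || l.any (fun s => s == "parent_ai")) := by
  induction l generalizing m h p with
  | nil => simp
  | cons a t ih =>
    have ha : a ≠ "" := hne a (List.mem_cons_self)
    rw [List.foldl_cons]
    have : combineOriginHintsStep (some f, m, h, p) a
        = (some f, m || (a != f), h || (a == "human"), p || (a == "parent_ai")) := by
      simp [combineOriginHintsStep, ha]
    rw [this, ih (fun s hs => hne s (List.mem_cons_of_mem _ hs))]
    simp [List.any_cons, Bool.or_assoc]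

theorem two_le_length_of_cons_mem {α : Type} {l : List α} {x : α}
    (hx : x ∈ l) : 2 ≤ (l.length + 1) := by
  cases l with
  | nil => simp at hx
  | cons c cs => simp

theorem discard_ofList_eq_nil_iff (t : List String) (a : String) :
    PySem.Set.discard (PySem.Set.ofList t) a = [] ↔ ∀ s ∈ t, s = a := by
  rw [List.eq_nil_iff_forall_not_mem]
  constructor
  · intro h s hs
    by_contra hne
    exact h s ((PySem.Set.mem_discard _ _ _).mpr ⟨(PySem.Set.mem_ofList _ _).mpr hs, hne⟩)
  · intro h s hs
    obtain ⟨hm, hne⟩ := (PySem.Set.mem_discard _ _ _).mp hs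
    exact hne (h s ((PySem.Set.mem_ofList _ _).mp hm))

-- ===== VERDICT (by name: the statement is the Claim_ definition above) =====
theorem combine_origin_hints_py_spec : Claim_equal_combine_origin_hints_py := by
  intro xs _
  show combine_origin_hints_py xs = combine_origin_hints_py_alt xs
  simp only [combine_origin_hints_py, combine_origin_hints_py_alt]
  rw [← List.foldl_map, foldl_step_filter]
  cases hns : (xs.map (fun value => PySem.Str.strip value)).filter (fun s => s != "") with
  | nil => simp [PySem.Set.ofList, PySem.Set.empty]
  | cons a t =>
    have hmem : ∀ s ∈ a :: t, s ≠ "" := by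
      intro s hs
      have := List.of_mem_filter (hns ▸ hs)
      simpa using this
    have ha : a ≠ "" := hmem a List.mem_cons_self
    have hstep : combineOriginHintsStep (none, false, false, false) a
        = (some a, false, (a == "human"), (a == "parent_ai")) := by
      simp [combineOriginHintsStep, ha]
    rw [List.foldl_cons, hstep,
        foldl_step_some t (fun s hs => hmem s (List.mem_cons_of_mem _ hs))]
    simp only [Bool.false_or]
    rw [PySem.Set.ofList_cons]
    by_cases hall : ∀ s ∈ t, s = a
    · have h1 : PySem.Set.discard (PySem.Set.ofList t) a = [] :=
        (discard_ofList_eq_nil_iff t a).mpr hall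
      have hany : t.any (fun s => s != a) = false := by
        simp only [List.any_eq_false, bne_iff_ne, ne_eq, not_not]
        exact hall
      simp [h1, hany, PySem.Set.len]
    · push_neg at hall
      obtain ⟨b, hb, hba⟩ := hall
      have hmb : b ∈ PySem.Set.discard (PySem.Set.ofList t) a :=
        (PySem.Set.mem_discard _ _ _).mpr ⟨(PySem.Set.mem_ofList _ _).mpr hb, hba⟩
      have hlen1 : PySem.Set.len (a :: PySem.Set.discard (PySem.Set.ofList t) a) ≠ 1 := by
        have := two_le_length_of_cons_mem hmb
        simp only [PySem.Set.len, List.length_cons]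
        omega
      have hany : t.any (fun s => s != a) = true := by
        simp only [List.any_eq_true, bne_iff_ne, ne_eq]
        exact ⟨b, hb, hba⟩
      have hch : ∀ x : String,
          PySem.Set.contains (a :: PySem.Set.discard (PySem.Set.ofList t) a) x
          = ((a == x) || t.any (fun s => s == x)) := by
        intro x
        by_cases hx : a = x ∨ x ∈ t
        · have h1 : PySem.Set.contains (a :: PySem.Set.discard (PySem.Set.ofList t) a) x = true := by
            rw [PySem.Set.contains_iff, ← PySem.Set.ofList_cons, PySem.Set.mem_ofList _ _]
            rcases hx with h | h
            · exact h ▸ List.mem_cons_self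
            · exact List.mem_cons_of_mem _ h
          rw [h1]
          rcases hx with h | h
          · simp [h]
          · have : t.any (fun s => s == x) = true := by
              simp only [List.any_eq_true, beq_iff_eq]
              exact ⟨x, h, rfl⟩
            simp [this]
        · push_neg at hx
          obtain ⟨hx1, hx2⟩ := hx
          have h1 : PySem.Set.contains (a :: PySem.Set.discard (PySem.Set.ofList t) a) x = false := by
            rw [Bool.eq_false_iff]
            intro hcon
            rw [PySem.Set.contains_iff, ← PySem.Set.ofList_cons, PySem.Set.mem_ofList _ _] at hcon
            rcases List.mem_cons.mp hcon with h | h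
            · exact hx1 h.symm
            · exact hx2 h
          have h2 : t.any (fun s => s == x) = false := by
            simp only [List.any_eq_false, beq_iff_eq]
            intro s hs hsx
            exact hx2 (hsx ▸ hs)
          simp [h2, hx2, Ne.symm hx1, hx1]
      simp only [List.isEmpty_cons, Bool.false_eq_true, if_false, hch "human", hch "parent_ai",
        hany, Bool.not_true]
      rw [if_neg hlen1]
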